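-- pv_equiv track=rewrite | github.com/bmyj0176/sudokuSolver | src/modes/insertion.py | process_rowcol_insert_input
-- ===== SOURCE A (Python) =====
-- def process_rowcol_insert_input(string):
--     alphabetFilter = ['A', 'B', 'C', 'D', 'E', 'F', 'G', 'H', 'J']
--     numFilter = list(map(str, range(1, 10)))
--     alphabetList = []
--     numList = []
--     insertNumList = []
--     spaced = False
--     for char in string:
--         if spaced == False:
--             if char.upper() in alphabetFilter: # row
--                 alphabetList.append(char.upper())
--             elif char in numFilter: # col
--                 numList.append(char)
--             elif char == ' ' or char == ',': # spacing
--                 spaced = True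
--         else: # spaced == True
--             if char in numFilter or char == '0':
--                 insertNumList.append(char)
--     if len(alphabetList) != 1:
--         return f"Invalid Row: \"{string}\"\n(Use A-J only, Example Input: 2f 3)", None, None
--     if len(numList) != 1:
--         return f"Invalid Column: \"{string}\"\n(Use 1-9 only, Example Input: 2f 3)", None, None
--     if spaced == False:
--         return f"No Spacing Detected: \"{string}\"\n(Use spacing or comma only, Example Input: 2f 3 or 2f,3)", None, None
--     if len(insertNumList) != 1:
--         return f"Invalid Number to be Inserted: \"{string}\"\n(Insert 1-9 or Delete using 0, Example Input: 2f 3)", None, None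
--     for alphabet_index in range(9):
--         if alphabetList[0] == alphabetFilter[alphabet_index]:
--             row = alphabet_index
--         col = int(numList[0])-1
--     return None, row*9+col, int(insertNumList[0]) # errorMessage, index, insertValue
-- ===== SOURCE B (Python) =====
-- def process_rowcol_insert_input(string):
--     # Split on the FIRST space/comma: prefix holds row/col chars, suffix the insert digit.
--     cut = next((i for i, c in enumerate(string) if c == ' ' or c == ','), None)
--     if cut is None:
--         prefix, suffix, spaced = string, '', False
--     else:
--         prefix, suffix, spaced = string[:cut], string[cut + 1:], True
--     rows = [c.upper() for c in prefix if c.upper() in 'ABCDEFGHJ']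
--     cols = [c for c in prefix if c in '123456789']
--     inserts = [c for c in suffix if c in '0123456789']
--     if len(rows) != 1:
--         return f"Invalid Row: \"{string}\"\n(Use A-J only, Example Input: 2f 3)", None, None
--     if len(cols) != 1:
--         return f"Invalid Column: \"{string}\"\n(Use 1-9 only, Example Input: 2f 3)", None, None
--     if not spaced:
--         return f"No Spacing Detected: \"{string}\"\n(Use spacing or comma only, Example Input: 2f 3 or 2f,3)", None, None
--     if len(inserts) != 1:
--         return f"Invalid Number to be Inserted: \"{string}\"\n(Insert 1-9 or Delete using 0, Example Input: 2f 3)", None, None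
--     return None, 'ABCDEFGHJ'.index(rows[0]) * 9 + int(cols[0]) - 1, int(inserts[0])
-- ===== Notes on version B (the rewrite author's own statement) =====
-- stated objective: simpler
-- what changed: B replaces A's single-pass state machine with a spaced flag and A's range(9) row-lookup loop by splitting the input at the first space/comma into prefix and suffix, filtering each segment with comprehensions, and resolving the row with str.index.
import Mathlib
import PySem

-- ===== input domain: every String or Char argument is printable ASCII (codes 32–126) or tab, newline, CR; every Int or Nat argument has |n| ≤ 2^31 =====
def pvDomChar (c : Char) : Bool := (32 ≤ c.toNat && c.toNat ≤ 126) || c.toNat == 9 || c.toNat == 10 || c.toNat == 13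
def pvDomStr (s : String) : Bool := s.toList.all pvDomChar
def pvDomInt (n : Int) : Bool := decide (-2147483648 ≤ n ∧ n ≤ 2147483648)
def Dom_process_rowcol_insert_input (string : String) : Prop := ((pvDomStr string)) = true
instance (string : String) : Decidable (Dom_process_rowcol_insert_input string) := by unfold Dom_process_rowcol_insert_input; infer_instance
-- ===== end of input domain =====

-- B splits the input at the first space/comma into prefix/suffix and filters each with comprehensions,
-- replacing A's stateful single-pass flag machine and A's range(9) row-resolution loop; objective: simpler.


-- ===== PORT A =====
def pvA_alphabetFilter : List Char := ['A', 'B', 'C', 'D', 'E', 'F', 'G', 'H', 'J']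
def pvA_numFilter : List Char := ['1', '2', '3', '4', '5', '6', '7', '8', '9']

-- one iteration of A's character loop; state = (alphabetList, numList, insertNumList, spaced)
def pvA_step (st : List Char × List Char × List Char × Bool) (c : Char) :
    List Char × List Char × List Char × Bool :=
  match st with
  | (al, nl, il, spaced) =>
    if spaced = false then
      if pvA_alphabetFilter.contains (PySem.Chars.upperChar c) then
        (al ++ [PySem.Chars.upperChar c], nl, il, spaced)
      else if pvA_numFilter.contains c then
        (al, nl ++ [c], il, spaced)
      else if c = ' ' ∨ c = ',' then
        (al, nl, il, true)
      else (al, nl, il, spaced)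
    else
      if pvA_numFilter.contains c ∨ c = '0' then
        (al, nl, il ++ [c], spaced)
      else (al, nl, il, spaced)

def process_rowcol_insert_input (string : String) : Option String × Option Int × Option Int :=
  match string.toList.foldl pvA_step ([], [], [], false) with
  | (alphabetList, numList, insertNumList, spaced) =>
    if alphabetList.length ≠ 1 then
      (some ("Invalid Row: \"" ++ string ++ "\"\n(Use A-J only, Example Input: 2f 3)"), none, none)
    else if numList.length ≠ 1 then
      (some ("Invalid Column: \"" ++ string ++ "\"\n(Use 1-9 only, Example Input: 2f 3)"), none, none)
    else if spaced = false then
      (some ("No Spacing Detected: \"" ++ string ++ "\"\n(Use spacing or comma only, Example Input: 2f 3 or 2f,3)"), none, none)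
    else if insertNumList.length ≠ 1 then
      (some ("Invalid Number to be Inserted: \"" ++ string ++ "\"\n(Insert 1-9 or Delete using 0, Example Input: 2f 3)"), none, none)
    else
      -- Python's `row` is unbound before the loop but is always assigned (alphabetList[0] ∈ filter);
      -- `col` is (re)assigned on every one of the 9 iterations. State = (row, col), row seeded with 0.
      match (PySem.List.pyRange 0 9 1).foldl (fun (rc : Int × Int) i =>
          ((if PySem.List.pyGetD alphabetList 0 ' ' = PySem.List.pyGetD pvA_alphabetFilter i ' '
            then i else rc.1),
           (PySem.Int.ofChars? [PySem.List.pyGetD numList 0 ' ']).getD 0 - 1)) (0, 0) with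
      | (row, col) =>
        (none, some (row * 9 + col),
         some ((PySem.Int.ofChars? [PySem.List.pyGetD insertNumList 0 ' ']).getD 0))

-- ===== PORT B =====
-- single-char `x in "…"` membership ported as membership in the string's char list (exact for single chars)
def process_rowcol_insert_input_alt (string : String) : Option String × Option Int × Option Int :=
  let cs := string.toList
  match (match cs.findIdx? (fun c => c == ' ' || c == ',') with
         | none => (cs, ([] : List Char), false)
         | some i => (cs.take i, cs.drop (i + 1), true)) with   -- string[:cut], string[cut+1:] with 0 ≤ cut < len: exact as take/drop
  | (pre, suf, spaced) =>
    let rows := (pre.filter (fun c => ("ABCDEFGHJ".toList).contains (PySem.Chars.upperChar c))).map PySem.Chars.upperChar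
    let cols := pre.filter (fun c => ("123456789".toList).contains c)
    let inserts := suf.filter (fun c => ("0123456789".toList).contains c)
    if rows.length ≠ 1 then
      (some ("Invalid Row: \"" ++ string ++ "\"\n(Use A-J only, Example Input: 2f 3)"), none, none)
    else if cols.length ≠ 1 then
      (some ("Invalid Column: \"" ++ string ++ "\"\n(Use 1-9 only, Example Input: 2f 3)"), none, none)
    else if spaced = false then
      (some ("No Spacing Detected: \"" ++ string ++ "\"\n(Use spacing or comma only, Example Input: 2f 3 or 2f,3)"), none, none)
    else if inserts.length ≠ 1 then
      (some ("Invalid Number to be Inserted: \"" ++ string ++ "\"\n(Insert 1-9 or Delete using 0, Example Input: 2f 3)"), none, none)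
    else
      (none,
       some (((PySem.List.index? ("ABCDEFGHJ".toList) (PySem.List.pyGetD rows 0 ' ')).getD 0 : Int) * 9
              + (PySem.Int.ofChars? [PySem.List.pyGetD cols 0 ' ']).getD 0 - 1),
       some ((PySem.Int.ofChars? [PySem.List.pyGetD inserts 0 ' ']).getD 0))

-- ===== PRECONDITION & SPEC =====
def Spec_process_rowcol_insert_input (string : String) (out : Option String × Option Int × Option Int) : Prop := out = process_rowcol_insert_input_alt string
instance (string : String) (out : Option String × Option Int × Option Int) : Decidable (Spec_process_rowcol_insert_input string out) := by unfold Spec_process_rowcol_insert_input; infer_instance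

-- ===== CLAIM (what is proved, stated in full; the proofs are below) =====
def Claim_equal_process_rowcol_insert_input : Prop := ∀ (string : String), Dom_process_rowcol_insert_input string → Spec_process_rowcol_insert_input string (process_rowcol_insert_input string)

-- ===== LEMMAS AND PROOFS =====

theorem pv_ins_cond (c : Char) : (pvA_numFilter.contains c = true ∨ c = '0') ↔ ("0123456789".toList.contains c = true) := by
  simp [pvA_numFilter]; tauto

theorem pv_fold_spaced (cs : List Char) (al nl il : List Char) :
    cs.foldl pvA_step (al, nl, il, true)
      = (al, nl, il ++ cs.filter (fun c => ("0123456789".toList).contains c), true) := by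
  induction cs generalizing il with
  | nil => simp
  | cons c cs ih =>
    rw [List.foldl_cons, List.filter_cons]
    by_cases h : pvA_numFilter.contains c = true ∨ c = '0'
    · rw [if_pos (pv_ins_cond c |>.mp h),
        show pvA_step (al, nl, il, true) c = (al, nl, il ++ [c], true) by simp only [pvA_step]; rw [if_neg (by decide), if_pos h], ih]
      simp
    · rw [if_neg (by simpa using (pv_ins_cond c).not.mp h),
        show pvA_step (al, nl, il, true) c = (al, nl, il, true) by simp only [pvA_step]; rw [if_neg (by decide), if_neg h], ih]

theorem pv_alpha_not_delim (c : Char) (h : pvA_alphabetFilter.contains (PySem.Chars.upperChar c) = true) :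
    (c == ' ' || c == ',') = false := by
  have h1 : c ≠ ' ' := by rintro rfl; revert h; decide
  have h2 : c ≠ ',' := by rintro rfl; revert h; decide
  simp [h1, h2]

theorem pv_num_not (c : Char) (h : pvA_numFilter.contains c = true) :
    pvA_alphabetFilter.contains (PySem.Chars.upperChar c) = false ∧ (c == ' ' || c == ',') = false := by
  simp [pvA_numFilter] at h
  rcases h with rfl|rfl|rfl|rfl|rfl|rfl|rfl|rfl|rfl <;> constructor <;> decide

theorem pv_delim_not (c : Char) (h : (c == ' ' || c == ',') = true) :
    pvA_alphabetFilter.contains (PySem.Chars.upperChar c) = false ∧ pvA_numFilter.contains c = false ∧ (c = ' ' ∨ c = ',') := by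
  simp at h
  rcases h with rfl|rfl <;> refine ⟨by decide, by decide, by simp⟩

theorem pv_fold_unspaced (cs : List Char) (al nl il : List Char) :
    cs.foldl pvA_step (al, nl, il, false)
      = match cs.findIdx? (fun c => c == ' ' || c == ',') with
        | none => (al ++ ((cs.filter (fun c => ("ABCDEFGHJ".toList).contains (PySem.Chars.upperChar c))).map PySem.Chars.upperChar),
                   nl ++ cs.filter (fun c => ("123456789".toList).contains c), il, false)
        | some i => (al ++ (((cs.take i).filter (fun c => ("ABCDEFGHJ".toList).contains (PySem.Chars.upperChar c))).map PySem.Chars.upperChar),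
                     nl ++ (cs.take i).filter (fun c => ("123456789".toList).contains c),
                     il ++ (cs.drop (i + 1)).filter (fun c => ("0123456789".toList).contains c), true) := by
  induction cs generalizing al nl with
  | nil => simp
  | cons c cs ih =>
    rw [List.foldl_cons, List.findIdx?_cons]
    by_cases ha : pvA_alphabetFilter.contains (PySem.Chars.upperChar c) = true
    · have hd : (c == ' ' || c == ',') = false := pv_alpha_not_delim c ha
      rw [show pvA_step (al, nl, il, false) c = (al ++ [PySem.Chars.upperChar c], nl, il, false) from by
        simp only [pvA_step]; rw [if_pos trivial, if_pos ha], ih, hd]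
      have ha' : ("ABCDEFGHJ".toList).contains (PySem.Chars.upperChar c) = true := ha
      have hn' : ("123456789".toList).contains c = false := by
        cases hx : pvA_numFilter.contains c with
        | false => exact hx
        | true => rw [(pv_num_not c hx).1] at ha; cases ha
      cases h : cs.findIdx? (fun c => c == ' ' || c == ',') with
      | none => simp only [h, Option.map_some, Option.map_none, List.filter_cons, List.map_cons, eq_self_iff_true, Bool.false_eq_true, Bool.true_eq_false, if_true, if_false, List.append_assoc, List.singleton_append, List.cons_append, List.nil_append, List.append_nil, List.take_succ_cons, List.drop_succ_cons, List.take_zero, List.drop_one, List.tail_cons, ha', hn']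
      | some i => simp only [h, Option.map_some, Option.map_none, List.filter_cons, List.map_cons, eq_self_iff_true, Bool.false_eq_true, Bool.true_eq_false, if_true, if_false, List.append_assoc, List.singleton_append, List.cons_append, List.nil_append, List.append_nil, List.take_succ_cons, List.drop_succ_cons, List.take_zero, List.drop_one, List.tail_cons, ha', hn']
    · by_cases hn : pvA_numFilter.contains c = true
      · have hd : (c == ' ' || c == ',') = false := (pv_num_not c hn).2
        rw [show pvA_step (al, nl, il, false) c = (al, nl ++ [c], il, false) from by
          simp only [pvA_step]; rw [if_pos trivial, if_neg ha, if_pos hn], ih, hd]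
        have ha' : ("ABCDEFGHJ".toList).contains (PySem.Chars.upperChar c) = false := by
          rwa [Bool.not_eq_true] at ha
        have hn' : ("123456789".toList).contains c = true := hn
        cases h : cs.findIdx? (fun c => c == ' ' || c == ',') with
        | none => simp only [h, Option.map_some, Option.map_none, List.filter_cons, List.map_cons, eq_self_iff_true, Bool.false_eq_true, Bool.true_eq_false, if_true, if_false, List.append_assoc, List.singleton_append, List.cons_append, List.nil_append, List.append_nil, List.take_succ_cons, List.drop_succ_cons, List.take_zero, List.drop_one, List.tail_cons, ha', hn']
        | some i => simp only [h, Option.map_some, Option.map_none, List.filter_cons, List.map_cons, eq_self_iff_true, Bool.false_eq_true, Bool.true_eq_false, if_true, if_false, List.append_assoc, List.singleton_append, List.cons_append, List.nil_append, List.append_nil, List.take_succ_cons, List.drop_succ_cons, List.take_zero, List.drop_one, List.tail_cons, ha', hn']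
      · by_cases hp : (c == ' ' || c == ',') = true
        · rcases pv_delim_not c hp with ⟨_, _, hor⟩
          rw [show pvA_step (al, nl, il, false) c = (al, nl, il, true) from by
            simp only [pvA_step]; rw [if_pos trivial, if_neg ha, if_neg hn, if_pos hor],
            pv_fold_spaced, hp]
          simp
        · have hp' : (c == ' ' || c == ',') = false := by simpa using hp
          have hor : ¬(c = ' ' ∨ c = ',') := by simpa using hp
          rw [show pvA_step (al, nl, il, false) c = (al, nl, il, false) from by
            simp only [pvA_step]; rw [if_pos trivial, if_neg ha, if_neg hn, if_neg hor],
            ih, hp']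
          have ha' : ("ABCDEFGHJ".toList).contains (PySem.Chars.upperChar c) = false := by
            rwa [Bool.not_eq_true] at ha
          have hn' : ("123456789".toList).contains c = false := by
            rwa [Bool.not_eq_true] at hn
          cases h : cs.findIdx? (fun c => c == ' ' || c == ',') with
          | none => simp only [h, Option.map_some, Option.map_none, List.filter_cons, List.map_cons, eq_self_iff_true, Bool.false_eq_true, Bool.true_eq_false, if_true, if_false, List.append_assoc, List.singleton_append, List.cons_append, List.nil_append, List.append_nil, List.take_succ_cons, List.drop_succ_cons, List.take_zero, List.drop_one, List.tail_cons, ha', hn']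
          | some i => simp only [h, Option.map_some, Option.map_none, List.filter_cons, List.map_cons, eq_self_iff_true, Bool.false_eq_true, Bool.true_eq_false, if_true, if_false, List.append_assoc, List.singleton_append, List.cons_append, List.nil_append, List.append_nil, List.take_succ_cons, List.drop_succ_cons, List.take_zero, List.drop_one, List.tail_cons, ha', hn']

theorem pv_fold_unspaced0 (cs : List Char) :
    cs.foldl pvA_step ([], [], [], false)
      = match cs.findIdx? (fun c => c == ' ' || c == ',') with
        | none => (((cs.filter (fun c => ("ABCDEFGHJ".toList).contains (PySem.Chars.upperChar c))).map PySem.Chars.upperChar),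
                   cs.filter (fun c => ("123456789".toList).contains c), ([] : List Char), false)
        | some i => ((((cs.take i).filter (fun c => ("ABCDEFGHJ".toList).contains (PySem.Chars.upperChar c))).map PySem.Chars.upperChar),
                     (cs.take i).filter (fun c => ("123456789".toList).contains c),
                     (cs.drop (i + 1)).filter (fun c => ("0123456789".toList).contains c), true) := by
  rw [pv_fold_unspaced]
  cases h : cs.findIdx? (fun c => c == ' ' || c == ',') <;> simp [h]

theorem pv_rowfold (c : Char) (hc : c ∈ "ABCDEFGHJ".toList) (k : Int) :
    (PySem.List.pyRange 0 9 1).foldl (fun (rc : Int × Int) i =>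
        ((if PySem.List.pyGetD [c] 0 ' ' = PySem.List.pyGetD pvA_alphabetFilter i ' ' then i else rc.1), k)) (0, 0)
      = (((PySem.List.index? ("ABCDEFGHJ".toList) (PySem.List.pyGetD [c] 0 ' ')).getD 0 : Int), k) := by
  have hr : PySem.List.pyRange 0 9 1 = [0, 1, 2, 3, 4, 5, 6, 7, 8] := by decide
  have hc' : c = 'A' ∨ c = 'B' ∨ c = 'C' ∨ c = 'D' ∨ c = 'E' ∨ c = 'F' ∨ c = 'G' ∨ c = 'H' ∨ c = 'J' := by
    simpa using hc
  rcases hc' with rfl|rfl|rfl|rfl|rfl|rfl|rfl|rfl|rfl <;>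
    simp [hr, List.foldl, PySem.List.pyGetD, PySem.List.pyIdx?, PySem.List.pyGet?, pvA_alphabetFilter,
      PySem.List.index?, List.idxOf?, List.findIdx?] <;> rfl

theorem pv_rows_singleton (pre : List Char)
    (h : ((pre.filter (fun c => ("ABCDEFGHJ".toList).contains (PySem.Chars.upperChar c))).map PySem.Chars.upperChar).length = 1) :
    ∃ c, (pre.filter (fun c => ("ABCDEFGHJ".toList).contains (PySem.Chars.upperChar c))).map PySem.Chars.upperChar = [c]
      ∧ c ∈ "ABCDEFGHJ".toList := by
  rcases List.length_eq_one_iff.mp h with ⟨c, hc⟩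
  refine ⟨c, hc, ?_⟩
  have : c ∈ (pre.filter (fun c => ("ABCDEFGHJ".toList).contains (PySem.Chars.upperChar c))).map PySem.Chars.upperChar := by
    rw [hc]; simp
  rcases List.mem_map.mp this with ⟨d, hd, rfl⟩
  have := List.of_mem_filter hd
  simpa using this

theorem pv_main (s : String) : process_rowcol_insert_input s = process_rowcol_insert_input_alt s := by
  unfold process_rowcol_insert_input process_rowcol_insert_input_alt
  rw [pv_fold_unspaced0]
  cases h : s.toList.findIdx? (fun c => c == ' ' || c == ',') with
  | none =>
    simp only [h]
    split_ifs <;> rfl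
  | some i =>
    simp only [h]
    split_ifs with h1 h2 h3 <;> try rfl
    rcases pv_rows_singleton _ (not_ne_iff.mp h1) with ⟨c, hrows, hc⟩
    rw [hrows, pv_rowfold c hc]
    simp only [Prod.mk.injEq, Option.some.injEq]
    refine ⟨trivial, by ring, trivial⟩

-- ===== VERDICT (by name: the statement is the Claim_ definition above) =====
theorem process_rowcol_insert_input_spec : Claim_equal_process_rowcol_insert_input := by
  intro s _
  exact pv_main s
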